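-- pv_equiv track=rewrite | github.com/mohits44/dsaCourse | intersection.py | findArrayIntersection
-- ===== SOURCE A (Python) =====
-- def findArrayIntersection(arr: list, n: int, brr: list, m: int):
--     lst = []
--     brr_set = set(brr)  # Convert brr to a set for faster lookups
--
--     for element in arr:
--         if element in brr_set:
--             lst.append(element)
--             brr_set.remove(element)  # Remove the element from the set to avoid duplicates
--
--     return lst
-- ===== SOURCE B (Python) =====
-- def findArrayIntersection(arr: list, n: int, brr: list, m: int):
--     # Record the first-occurrence index of each value in arr.
--     first_index = {}
--     for i, e in enumerate(arr):
--         if e not in first_index: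
--             first_index[e] = i
--     # The members of the answer are exactly the common values.
--     common = set(arr) & set(brr)
--     # arr-order = ascending first-occurrence index (keys are distinct,
--     # so the sort is deterministic regardless of set iteration order).
--     return sorted(common, key=lambda e: first_index[e])
-- ===== Notes on version B (the rewrite author's own statement) =====
-- stated objective: alternative
-- what changed: Replaces A's single filtering pass with set mutation by an index-and-sort algorithm: build a first-occurrence index map of arr, compute the common values as a set intersection set(arr) & set(brr), and sort them by first-occurrence index (distinct keys make the sort deterministic).
import Mathlib
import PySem

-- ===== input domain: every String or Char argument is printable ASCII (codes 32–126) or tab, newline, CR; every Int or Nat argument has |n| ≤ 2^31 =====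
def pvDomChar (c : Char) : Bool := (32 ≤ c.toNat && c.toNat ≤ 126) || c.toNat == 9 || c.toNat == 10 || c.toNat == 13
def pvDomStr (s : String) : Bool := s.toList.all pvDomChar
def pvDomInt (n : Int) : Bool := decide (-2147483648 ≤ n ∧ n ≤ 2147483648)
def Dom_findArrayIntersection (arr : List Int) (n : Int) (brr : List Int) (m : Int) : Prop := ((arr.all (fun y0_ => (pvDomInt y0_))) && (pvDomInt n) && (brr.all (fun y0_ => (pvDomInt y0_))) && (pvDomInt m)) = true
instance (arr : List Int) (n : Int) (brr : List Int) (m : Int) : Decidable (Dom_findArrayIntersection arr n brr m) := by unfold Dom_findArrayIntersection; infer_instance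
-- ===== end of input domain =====

-- B replaces A's single filtering pass with set mutation by an index-and-sort algorithm:
-- build a first-occurrence index map of arr, intersect set(arr) & set(brr), and sort the
-- common values by first-occurrence index (keys distinct, so the sort is deterministic).

-- ===== PORT A =====
-- for element in arr: if element in brr_set: lst.append(element); brr_set.remove(element)
def findArrayIntersection (arr : List Int) (n : Int) (brr : List Int) (m : Int) : List Int :=
  (arr.foldl (fun (st : List Int × PySem.Set Int) element =>
      if PySem.Set.contains st.2 element then
        -- brr_set.remove(element): the guard guarantees membership, so remove? is `some`
        -- and getD's default is unreachable (Python would raise KeyError only when absent)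
        (st.1 ++ [element], (PySem.Set.remove? st.2 element).getD st.2)
      else st)
    ([], PySem.Set.ofList brr)).1

-- ===== PORT B =====
def findArrayIntersection_alt (arr : List Int) (n : Int) (brr : List Int) (m : Int) : List Int :=
  -- first_index: for i, e in enumerate(arr): if e not in first_index: first_index[e] = i
  let first_index := (PySem.List.enumerate arr).foldl
      (fun (d : PySem.Dict Int Int) p => if d.contains p.2 then d else d.insert p.2 p.1)
      PySem.Dict.empty
  let common := PySem.Set.inter (PySem.Set.ofList arr) (PySem.Set.ofList brr)
  -- sorted(common, key=lambda e: first_index[e]); every e in common is a key of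
  -- first_index, so the lookup never raises and getD's default is unreachable;
  -- the key is injective on common, so the result is iteration-order independent
  PySem.List.sorted common (fun e => first_index.getD e 0) false

-- ===== PRECONDITION & SPEC =====
def Spec_findArrayIntersection (arr : List Int) (n : Int) (brr : List Int) (m : Int) (out : List Int) : Prop := out = findArrayIntersection_alt arr n brr m
instance (arr : List Int) (n : Int) (brr : List Int) (m : Int) (out : List Int) : Decidable (Spec_findArrayIntersection arr n brr m out) := by unfold Spec_findArrayIntersection; infer_instance

-- ===== CLAIM (what is proved, stated in full; the proofs are below) =====
def Claim_equal_findArrayIntersection : Prop := ∀ (arr : List Int) (n : Int) (brr : List Int) (m : Int), Dom_findArrayIntersection arr n brr m → Spec_findArrayIntersection arr n brr m (findArrayIntersection arr n brr m)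

-- ===== LEMMAS AND PROOFS =====

-- common recursive description of A's result: first occurrences of still-available elements
def pvGo : List Int → PySem.Set Int → List Int
  | [], _ => []
  | x :: xs, s => if PySem.Set.contains s x then x :: pvGo xs (PySem.Set.discard s x) else pvGo xs s

lemma pvRemove_getD_of_mem (s : PySem.Set Int) (x : Int) (h : x ∈ s) :
    (PySem.Set.remove? s x).getD s = s.discard x := by
  rw [PySem.Set.remove?_of_mem h]; rfl

lemma pvFoldA (arr : List Int) (acc : List Int) (s : PySem.Set Int) :
    (arr.foldl (fun (st : List Int × PySem.Set Int) element =>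
      if PySem.Set.contains st.2 element then
        (st.1 ++ [element], (PySem.Set.remove? st.2 element).getD st.2)
      else st) (acc, s)).1 = acc ++ pvGo arr s := by
  induction arr generalizing acc s with
  | nil => simp [pvGo]
  | cons x xs ih =>
    rw [List.foldl_cons]
    by_cases hx : x ∈ s
    · have hc : PySem.Set.contains s x = true := by rw [PySem.Set.contains_iff]; exact hx
      simp only [hc, if_true, pvRemove_getD_of_mem s x hx]
      rw [ih]
      simp [pvGo, hx]
    · have hc : PySem.Set.contains s x = false := by
        rw [Bool.eq_false_iff]
        intro h
        exact hx ((PySem.Set.contains_iff _ _).1 h)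
      simp only [hc, Bool.false_eq_true, if_false]
      rw [ih]
      simp [pvGo, hx]

lemma pvFoldB (bs : PySem.Set Int) (arr : List Int) (acc : List Int) (s : List Int)
    (hs : s.Nodup) (hmem : ∀ y, y ∈ s ↔ y ∈ bs ∧ y ∉ acc) :
    (arr.foldl PySem.Set.add acc).filter (fun e => PySem.Set.contains bs e)
      = acc.filter (fun e => PySem.Set.contains bs e) ++ pvGo arr s := by
  induction arr generalizing acc s with
  | nil => simp [pvGo]
  | cons x xs ih =>
    rw [List.foldl_cons]
    by_cases hacc : x ∈ acc
    · have hadd : PySem.Set.add acc x = acc := by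
        simp [PySem.Set.add, hacc]
      have hxs : x ∉ s := fun hxin => ((hmem x).1 hxin).2 hacc
      rw [hadd, ih acc s hs hmem]
      simp [pvGo, hxs]
    · have hadd : PySem.Set.add acc x = acc ++ [x] := by
        simp [PySem.Set.add, hacc]
      rw [hadd]
      by_cases hb : x ∈ bs
      · have hxs : x ∈ s := (hmem x).2 ⟨hb, hacc⟩
        rw [ih (acc ++ [x]) (PySem.Set.discard s x) (PySem.Set.nodup_discard s x hs)
          (by
            intro y
            rw [PySem.Set.mem_discard]
            constructor
            · rintro ⟨hy, hne⟩
              rcases (hmem y).1 hy with ⟨hyb, hya⟩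
              exact ⟨hyb, by simp [hya, hne]⟩
            · rintro ⟨hyb, hya⟩
              simp only [List.mem_append, List.mem_singleton, not_or] at hya
              exact ⟨(hmem y).2 ⟨hyb, hya.1⟩, hya.2⟩)]
        simp [pvGo, hxs, hb, List.filter_append]
      · have hxs : x ∉ s := fun hxin => hb ((hmem x).1 hxin).1
        rw [ih (acc ++ [x]) s hs
          (by
            intro y
            constructor
            · rintro hy
              rcases (hmem y).1 hy with ⟨hyb, hya⟩
              have hne : y ≠ x := fun he => hb (he ▸ hyb)
              simp [hyb, hya, hne]
            · rintro ⟨hyb, hya⟩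
              simp only [List.mem_append, List.mem_singleton, not_or] at hya
              exact (hmem y).2 ⟨hyb, hya.1⟩)]
        simp [pvGo, hxs, hb, List.filter_append]

-- set(arr) & set(brr) lists exactly A's output values, in A's order
lemma pvInter_eq_pvGo (arr brr : List Int) :
    PySem.Set.inter (PySem.Set.ofList arr) (PySem.Set.ofList brr)
      = pvGo arr (PySem.Set.ofList brr) := by
  show (PySem.Set.ofList arr).filter (fun e => PySem.Set.contains (PySem.Set.ofList brr) e)
      = pvGo arr (PySem.Set.ofList brr)
  rw [PySem.Set.ofList_eq_foldl arr]
  exact pvFoldB (PySem.Set.ofList brr) arr [] (PySem.Set.ofList brr)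
    (PySem.Set.nodup_ofList brr) (by intro y; simp [PySem.Set.mem_ofList])

-- the first_index fold, characterised: lookups return start + first-occurrence index
lemma pvDictFold (l : List Int) (s : Int) (d : PySem.Dict Int Int) (e : Int) :
    ((PySem.List.enumerate l s).foldl
        (fun (d : PySem.Dict Int Int) p => if d.contains p.2 then d else d.insert p.2 p.1) d).get? e
    = if d.contains e then d.get? e
      else if e ∈ l then some (s + (l.idxOf e : Int)) else none := by
  induction l generalizing s d with
  | nil =>
    by_cases hde : d.contains e <;>
      simp [PySem.List.enumerate, hde, PySem.Dict.get?_eq_none_iff_contains]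
  | cons x t ih =>
    rw [PySem.List.enumerate_cons, List.foldl_cons]
    by_cases hdx : d.contains x
    · simp only [hdx, if_true, ih]
      by_cases hde : d.contains e
      · simp [hde]
      · have hex : e ≠ x := fun h => hde (h ▸ hdx)
        simp only [hde, Bool.false_eq_true, if_false, List.mem_cons, hex, false_or,
          List.idxOf_cons_ne t (Ne.symm hex)]
        by_cases het : e ∈ t <;> simp [het] <;> ring
    · simp only [hdx, Bool.false_eq_true, if_false, ih]
      by_cases hex : e = x
      · subst hex
        simp [PySem.Dict.contains_insert_self, PySem.Dict.get?_insert_self, hdx,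
          List.idxOf_cons_self]
      · have hci : (d.insert x s).contains e = d.contains e := by
          rw [PySem.Dict.contains_insert]
          simp [hex]
        rw [hci, PySem.Dict.get?_insert_of_ne d s hex]
        by_cases hde : d.contains e
        · simp [hde]
        · simp only [hde, Bool.false_eq_true, if_false, List.mem_cons, hex, false_or,
            List.idxOf_cons_ne t (Ne.symm hex)]
          by_cases het : e ∈ t <;> simp [het] <;> ring

-- the key used by B equals the first-occurrence index, on members of arr
lemma pvKey_eq_idxOf (arr : List Int) (e : Int) (he : e ∈ arr) :
    ((PySem.List.enumerate arr).foldl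
        (fun (d : PySem.Dict Int Int) p => if d.contains p.2 then d else d.insert p.2 p.1)
        PySem.Dict.empty).getD e 0 = (arr.idxOf e : Int) := by
  rw [PySem.Dict.getD_eq_get?_getD, pvDictFold]
  simp [PySem.Dict.contains_empty, he]

-- set(arr) is strictly increasing in first-occurrence index
lemma pvOfList_pairwise_idxOf (arr : List Int) :
    (PySem.Set.ofList arr).Pairwise (fun a b => arr.idxOf a < arr.idxOf b) := by
  induction arr with
  | nil => simp [PySem.Set.ofList_nil]
  | cons x t ih =>
    rw [PySem.Set.ofList_cons]
    refine List.Pairwise.cons ?_ ?_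
    · intro b hb
      rcases (PySem.Set.mem_discard _ _ _).1 hb with ⟨hbt, hbx⟩
      rw [List.idxOf_cons_self, List.idxOf_cons_ne t (Ne.symm hbx)]
      omega
    · have hfil : (PySem.Set.discard (PySem.Set.ofList t) x).Pairwise
          (fun a b => t.idxOf a < t.idxOf b) :=
        List.Pairwise.filter _ ih
      refine List.Pairwise.imp_of_mem ?_ hfil
      intro a b ha hb hab
      rcases (PySem.Set.mem_discard _ _ _).1 ha with ⟨_, hax⟩
      rcases (PySem.Set.mem_discard _ _ _).1 hb with ⟨_, hbx⟩
      rw [List.idxOf_cons_ne t (Ne.symm hax), List.idxOf_cons_ne t (Ne.symm hbx)]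
      omega

-- ===== VERDICT (by name: the statement is the Claim_ definition above) =====
theorem findArrayIntersection_spec : Claim_equal_findArrayIntersection := by
  intro arr n brr m _
  show findArrayIntersection arr n brr m = findArrayIntersection_alt arr n brr m
  unfold findArrayIntersection findArrayIntersection_alt
  rw [pvFoldA, List.nil_append]
  have hsorted : PySem.List.sorted
      (PySem.Set.inter (PySem.Set.ofList arr) (PySem.Set.ofList brr))
      (fun e => ((PySem.List.enumerate arr).foldl
        (fun (d : PySem.Dict Int Int) p => if d.contains p.2 then d else d.insert p.2 p.1)
        PySem.Dict.empty).getD e 0) false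
      = PySem.Set.inter (PySem.Set.ofList arr) (PySem.Set.ofList brr) := by
    apply PySem.List.sorted_eq_self_of_pairwise
    have hsub : ∀ e ∈ PySem.Set.inter (PySem.Set.ofList arr) (PySem.Set.ofList brr), e ∈ arr := by
      intro e he
      exact (PySem.Set.mem_ofList _ _).1 ((PySem.Set.mem_inter _ _ _).1 he).1
    have hpw : (PySem.Set.inter (PySem.Set.ofList arr) (PySem.Set.ofList brr)).Pairwise
        (fun a b => arr.idxOf a < arr.idxOf b) :=
      List.Pairwise.filter _ (pvOfList_pairwise_idxOf arr)
    refine List.Pairwise.imp_of_mem ?_ hpw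
    intro a b ha hb hab
    rw [pvKey_eq_idxOf arr a (hsub a ha), pvKey_eq_idxOf arr b (hsub b hb)]
    exact_mod_cast Nat.le_of_lt hab
  rw [hsorted, pvInter_eq_pvGo]
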